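-- pv_equiv track=rewrite | github.com/apefind/math | jupyter/turing_machine.py | int2xnbin
-- ===== SOURCE A (Python) =====
-- def int2bin(x):
--     return [int(i) for i in bin(x)[2:]]
--
-- def int2xnbin(X):
--     y = []
--     for x in X:
--         for n in int2bin(x):
--             if n == 0:
--                 y.append(0)
--             elif n == 1:
--                 y.append(1)
--                 y.append(0)
--         y.append(1)
--         y.append(1)
--         y.append(0)
--     return y
-- ===== SOURCE B (Python) =====
-- def int2xnbin(X):
--     # Pure-arithmetic encoder: extract bits LSB-first with divmod (no bin()/strings)
--     # and build the whole output back-to-front by prepending each number's block.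
--     y = []
--     for x in reversed(X):
--         block = [1, 1, 0]
--         if x == 0:
--             block = [0] + block
--         else:
--             while x > 0:
--                 x, b = divmod(x, 2)
--                 block = ([1, 0] if b else [0]) + block
--         y = block + y
--     return y
-- ===== Notes on version B (the rewrite author's own statement) =====
-- stated objective: alternative
-- what changed: Replaces bin()-string digit iteration with pure arithmetic bit extraction via divmod (LSB-first), building each number's block and the whole output back-to-front by prepending, iterating X in reverse.
import Mathlib
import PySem

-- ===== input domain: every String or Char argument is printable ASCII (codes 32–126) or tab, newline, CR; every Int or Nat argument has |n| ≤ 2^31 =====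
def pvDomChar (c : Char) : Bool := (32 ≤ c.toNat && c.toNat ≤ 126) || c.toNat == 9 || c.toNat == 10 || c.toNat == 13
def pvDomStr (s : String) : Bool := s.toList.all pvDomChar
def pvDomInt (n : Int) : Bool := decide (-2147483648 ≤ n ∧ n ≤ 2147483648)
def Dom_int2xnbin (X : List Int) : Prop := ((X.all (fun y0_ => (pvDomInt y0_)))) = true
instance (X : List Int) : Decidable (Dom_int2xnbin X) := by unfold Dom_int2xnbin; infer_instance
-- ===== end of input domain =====

-- B drops bin()-string digit iteration for pure arithmetic bit extraction (divmod,
-- LSB-first) and builds the output back-to-front by prepending blocks over reversed X.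

-- ===== PORT A =====
-- Python's bin(x)[2:] for x ≥ 0, as digit characters (MSB first).
def binCharsAux : Nat → List Char → List Char
  | 0, acc => acc
  | n+1, acc =>
      binCharsAux ((n+1) / 2) ((if (n+1) % 2 = 1 then '1' else '0') :: acc)
decreasing_by exact Nat.div_lt_self (Nat.succ_pos n) (by norm_num)

def binChars (n : Nat) : List Char :=
  if n = 0 then ['0'] else binCharsAux n []

-- int2bin(x) = [int(i) for i in bin(x)[2:]]; exact for x ≥ 0 (Pre_), int(c) on a digit char is its value
def int2bin (x : Int) : List Int :=
  (binChars x.toNat).map (fun c => ((c.toNat : Int) - 48))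

def int2xnbin (X : List Int) : List Int :=
  X.foldl (fun y x =>
    ((int2bin x).foldl (fun y n =>
        if n = 0 then y ++ [0]
        else if n = 1 then y ++ [1, 0]
        else y) y) ++ [1, 1, 0]) []

-- ===== PORT B =====
-- the 'while x > 0' loop: prepend the encoding of each LSB in front of the block
def bitsBlock : Nat → List Int → List Int
  | 0, block => block
  | n+1, block =>
      bitsBlock ((n+1) / 2) ((if (n+1) % 2 = 1 then [1, 0] else [0]) ++ block)
decreasing_by exact Nat.div_lt_self (Nat.succ_pos n) (by norm_num)

-- 'for x in reversed(X): y = block + y'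
def int2xnbin_alt (X : List Int) : List Int :=
  X.reverse.foldl (fun y x =>
    (if x = 0 then 0 :: [1, 1, 0] else bitsBlock x.toNat [1, 1, 0]) ++ y) []

-- ===== PRECONDITION & SPEC =====
-- Pre_ excludes negative entries: there Python's A raises ValueError (int('b') on bin(x)[2:]).
def Pre_int2xnbin (X : List Int) : Prop := ∀ x ∈ X, 0 ≤ x
instance (X : List Int) : Decidable (Pre_int2xnbin X) := by unfold Pre_int2xnbin; infer_instance
def pvWitness_int2xnbin : List Int := [0, 5, 1023]

def Spec_int2xnbin (X : List Int) (out : List Int) : Prop := out = int2xnbin_alt X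
instance (X : List Int) (out : List Int) : Decidable (Spec_int2xnbin X out) := by unfold Spec_int2xnbin; infer_instance

-- ===== CLAIM (what is proved, stated in full; the proofs are below) =====
def Claim_equal_int2xnbin : Prop := ∀ (X : List Int), Dom_int2xnbin X → Pre_int2xnbin X → Spec_int2xnbin X (int2xnbin X)

-- ===== LEMMAS AND PROOFS =====

-- per-character value encoding of a digit string (proof-side common form)
def encC (ds : List Char) : List Int :=
  ds.flatMap (fun c => if c = '1' then [1, 0] else [0])

theorem binCharsAux_bits (n : Nat) (acc : List Char)
    (h : ∀ c ∈ acc, c = '0' ∨ c = '1') :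
    ∀ c ∈ binCharsAux n acc, c = '0' ∨ c = '1' := by
  induction n, acc using binCharsAux.induct with
  | case1 acc => simpa [binCharsAux] using h
  | case2 n acc ih =>
      rw [binCharsAux]
      apply ih
      intro c hc
      rcases List.mem_cons.mp hc with h1 | h2
      · subst h1; split_ifs <;> simp
      · exact h c h2

theorem binChars_bits (n : Nat) : ∀ c ∈ binChars n, c = '0' ∨ c = '1' := by
  unfold binChars
  split
  · simp
  · exact binCharsAux_bits n [] (by simp)

-- A's inner per-bit loop from y equals y ++ encC of the digits
theorem inner_loop_eq (ds : List Char) (h : ∀ c ∈ ds, c = '0' ∨ c = '1') (y : List Int) :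
    (ds.map (fun c => ((c.toNat : Int) - 48))).foldl (fun y n =>
        if n = 0 then y ++ [0]
        else if n = 1 then y ++ [1, 0]
        else y) y
    = y ++ encC ds := by
  induction ds generalizing y with
  | nil => simp [encC]
  | cons c ds ih =>
      have hc := h c (by simp)
      have hrest : ∀ c ∈ ds, c = '0' ∨ c = '1' := fun c hm => h c (List.mem_cons_of_mem _ hm)
      rcases hc with rfl | rfl <;> simp [encC, ih hrest]

-- bitsBlock computes encC of binCharsAux
theorem bitsBlock_eq (n : Nat) (rest : List Int) (acc : List Char) :
    encC (binCharsAux n acc) ++ rest = bitsBlock n (encC acc ++ rest) := by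
  induction n using Nat.strong_induction_on generalizing acc with
  | _ n ih =>
      match n with
      | 0 => simp [binCharsAux, bitsBlock]
      | n+1 =>
          rw [binCharsAux, bitsBlock,
            ih ((n+1)/2) (Nat.div_lt_self (Nat.succ_pos n) (by norm_num))]
          congr 1
          simp only [encC, List.flatMap_cons]
          split_ifs <;> simp_all

-- A's per-number block equals B's, for x ≥ 0
theorem block_eq (x : Int) (hx : 0 ≤ x) :
    encC (binChars x.toNat) ++ [1, 1, 0]
      = (if x = 0 then 0 :: [1, 1, 0] else bitsBlock x.toNat [1, 1, 0]) := by
  by_cases h0 : x = 0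
  · subst h0; simp [binChars, encC]
  · have hn : x.toNat ≠ 0 := by omega
    rw [if_neg h0, binChars, if_neg hn]
    simpa [encC] using bitsBlock_eq x.toNat [1, 1, 0] []
    
-- A's outer fold collects the blocks left-to-right
theorem outer_A (X : List Int) (y : List Int) :
    X.foldl (fun y x =>
      ((int2bin x).foldl (fun y n =>
          if n = 0 then y ++ [0]
          else if n = 1 then y ++ [1, 0]
          else y) y) ++ [1, 1, 0]) y
    = y ++ X.flatMap (fun x => encC (binChars x.toNat) ++ [1, 1, 0]) := by
  induction X generalizing y with
  | nil => simp
  | cons x X ih =>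
      simp only [List.foldl_cons, List.flatMap_cons]
      rw [ih, int2bin, inner_loop_eq _ (binChars_bits x.toNat)]
      simp

-- B's reversed fold with prepend is the same flatMap
theorem outer_B (f : Int → List Int) (X : List Int) (y : List Int) :
    X.reverse.foldl (fun y x => f x ++ y) y = X.flatMap f ++ y := by
  induction X generalizing y with
  | nil => simp
  | cons x X ih =>
      simp only [List.reverse_cons, List.foldl_append, List.foldl_cons, List.foldl_nil,
        List.flatMap_cons, ih]
      simp

-- ===== VERDICT (by name: the statement is the Claim_ definition above) =====
theorem int2xnbin_spec : Claim_equal_int2xnbin := by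
  intro X _ hpre
  unfold Spec_int2xnbin int2xnbin int2xnbin_alt
  rw [outer_A, outer_B]
  simp only [List.nil_append, List.append_nil]
  apply List.flatMap_congr  -- pointwise on members
  intro x hx
  exact block_eq x (hpre x hx)
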